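-- pv_equiv track=rewrite | github.com/HououinKyouma01/ChouMegumiDownload | chou-megumi-download.py | format_progress_output
-- ===== SOURCE A (Python) =====
-- def format_progress_output(output):
--     lines = output.split('\n')
--     formatted_lines = []
--     progress_line = ""
--     for line in lines:
--         if line.startswith("Progress:"):
--             progress_line = line
--         else:
--             if progress_line:
--                 formatted_lines.append(progress_line)
--                 progress_line = ""
--             formatted_lines.append(line)
--     if progress_line:
--         formatted_lines.append(progress_line)
--     return '\n'.join(formatted_lines)
-- ===== SOURCE B (Python) =====
-- def format_progress_output(output):
--     lines = output.split('\n')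
--     kept = [a for a, b in zip(lines, lines[1:])
--             if not (a.startswith("Progress:") and b.startswith("Progress:"))]
--     kept.append(lines[-1])
--     return '\n'.join(kept)
-- ===== Notes on version B (the rewrite author's own statement) =====
-- stated objective: simpler
-- what changed: Replaces A's pending-buffer state machine (carrying the last seen progress line and flushing it before each non-progress line and at the end) with a stateless look-ahead filter: zip each line with its successor and drop a line exactly when it and its successor are both progress lines, always keeping the final line.
import Mathlib
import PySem

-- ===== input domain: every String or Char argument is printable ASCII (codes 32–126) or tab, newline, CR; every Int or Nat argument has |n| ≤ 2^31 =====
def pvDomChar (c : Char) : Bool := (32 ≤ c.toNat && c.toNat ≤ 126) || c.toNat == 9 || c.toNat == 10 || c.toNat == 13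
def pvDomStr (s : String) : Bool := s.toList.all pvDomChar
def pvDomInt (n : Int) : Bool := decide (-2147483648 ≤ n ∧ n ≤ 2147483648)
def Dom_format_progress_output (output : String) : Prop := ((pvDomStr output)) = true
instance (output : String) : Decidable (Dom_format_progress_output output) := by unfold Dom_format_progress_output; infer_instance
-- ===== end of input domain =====

-- B replaces A's pending-buffer state machine with a look-ahead filter over adjacent line pairs (objective: simpler).

-- ===== PORT A =====
-- A's for-loop carries (formatted_lines, progress_line); the trailing flush happens after the loop.
def format_progress_output (output : String) : String :=
  let lines := (PySem.Str.split? output "\n").getD []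
  let st := lines.foldl
    (fun (st : List String × String) line =>
      if PySem.Str.startswith line "Progress:" then (st.1, line)
      else
        let fl := if st.2 ≠ "" then st.1 ++ [st.2] else st.1
        (fl ++ [line], ""))
    ([], "")
  let fl := if st.2 ≠ "" then st.1 ++ [st.2] else st.1
  PySem.Str.join "\n" fl

-- ===== PORT B =====
-- kept = [a for a,b in zip(lines, lines[1:]) if not (a.startswith(…) and b.startswith(…))]; kept.append(lines[-1])
-- (lines[-1] ported as pyGet? lines (-1); Option.toList yields nothing exactly where Python would raise IndexError,
-- which is unreachable since split always returns a nonempty list)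
def format_progress_output_alt (output : String) : String :=
  let lines := (PySem.Str.split? output "\n").getD []
  let kept := ((lines.zip lines.tail).filter
      (fun ab => !(PySem.Str.startswith ab.1 "Progress:" && PySem.Str.startswith ab.2 "Progress:"))).map Prod.fst
  let kept := kept ++ (PySem.List.pyGet? lines (-1)).toList
  PySem.Str.join "\n" kept

-- ===== PRECONDITION & SPEC =====
def Spec_format_progress_output (output : String) (out : String) : Prop := out = format_progress_output_alt output
instance (output : String) (out : String) : Decidable (Spec_format_progress_output output out) := by unfold Spec_format_progress_output; infer_instance

-- ===== CLAIM (what is proved, stated in full; the proofs are below) =====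
def Claim_equal_format_progress_output : Prop := ∀ (output : String), Dom_format_progress_output output → Spec_format_progress_output output (format_progress_output output)

-- ===== LEMMAS AND PROOFS =====

-- abbreviations for the two list-level computations (proof-only helpers)
def pvSw (s : String) : Bool := PySem.Str.startswith s "Progress:"

def pvStep (st : List String × String) (line : String) : List String × String :=
  if pvSw line then (st.1, line)
  else
    let fl := if st.2 ≠ "" then st.1 ++ [st.2] else st.1
    (fl ++ [line], "")

def pvA (l : List String) (p : String) : List String :=
  let st := l.foldl pvStep ([], p)
  if st.2 ≠ "" then st.1 ++ [st.2] else st.1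

def pvB (l : List String) : List String :=
  ((l.zip l.tail).filter (fun ab => !(pvSw ab.1 && pvSw ab.2))).map Prod.fst
    ++ (PySem.List.pyGet? l (-1)).toList

lemma pvFoldl_acc (l : List String) (fl : List String) (p : String) :
    l.foldl pvStep (fl, p) = (fl ++ (l.foldl pvStep ([], p)).1, (l.foldl pvStep ([], p)).2) := by
  induction l generalizing fl p with
  | nil => simp
  | cons x xs ih =>
    simp only [List.foldl_cons]
    have hstep : pvStep (fl, p) x = (fl ++ (pvStep ([], p) x).1, (pvStep ([], p) x).2) := by
      by_cases hx : pvSw x <;> by_cases hp : p ≠ "" <;> simp [pvStep, hx, hp]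
    cases h : pvStep ([], p) x with
    | mk c1 c2 =>
      rw [h] at hstep
      rw [hstep, ih (fl ++ c1) c2, ih c1 c2]
      simp

lemma pvA_nil (p : String) : pvA [] p = if p ≠ "" then [p] else [] := by simp [pvA]

lemma pvA_cons (x : String) (l : List String) (p : String) :
    pvA (x :: l) p = if pvSw x then pvA l x
      else (if p ≠ "" then [p] else []) ++ x :: pvA l "" := by
  simp only [pvA, List.foldl_cons]
  by_cases hx : pvSw x
  · simp [pvStep, hx]
  · have hstep : pvStep ([], p) x = ((if p ≠ "" then [p] else []) ++ [x], "") := by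
      by_cases hp : p ≠ "" <;> simp [pvStep, hx, hp]
    rw [hstep, if_neg hx, pvFoldl_acc]
    by_cases h2 : (l.foldl pvStep ([], "")).2 ≠ "" <;> simp [h2]

lemma pvSw_ne_empty {s : String} (h : pvSw s = true) : s ≠ "" := by
  intro he; subst he
  simp only [pvSw, PySem.Str.startswith_eq] at h
  rw [PySem.Chars.startswith_iff] at h
  simp at h

lemma pvB_singleton (x : String) : pvB [x] = [x] := by simp [pvB, PySem.List.pyGet?_neg_one]

lemma pvB_cons (x y : String) (ys : List String) :
    pvB (x :: y :: ys) = (if pvSw x && pvSw y then [] else [x]) ++ pvB (y :: ys) := by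
  cases hx : pvSw x <;> cases hy : pvSw y <;>
    simp [pvB, hx, hy, PySem.List.pyGet?_neg_one]

lemma pvAB (l : List String) :
    pvA l "" = pvB l ∧ ∀ p, pvSw p = true → pvA l p = pvB (p :: l) := by
  induction l with
  | nil =>
    refine ⟨by simp [pvA_nil, pvB, PySem.List.pyGet?_neg_one], fun p hp => ?_⟩
    rw [pvA_nil, pvB_singleton, if_pos (pvSw_ne_empty hp)]
  | cons x xs ih =>
    constructor
    · rw [pvA_cons]
      by_cases hx : pvSw x
      · rw [if_pos hx, ih.2 x hx]
      · simp only [hx, if_false, Bool.false_eq_true]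
        cases xs with
        | nil => simp [pvA_nil, pvB_singleton]
        | cons y ys => rw [pvB_cons, ih.1]; simp [hx]
    · intro p hp
      rw [pvA_cons, pvB_cons]
      by_cases hx : pvSw x
      · rw [if_pos hx, ih.2 x hx]; simp [hp, hx]
      · simp only [hx, Bool.false_eq_true, if_false, Bool.and_false, hp]
        rw [if_pos (pvSw_ne_empty hp)]
        cases xs with
        | nil => simp [pvA_nil, pvB_singleton]
        | cons y ys => rw [pvB_cons, ih.1]; simp [hx]

-- ===== VERDICT (by name: the statement is the Claim_ definition above) =====
theorem format_progress_output_spec : Claim_equal_format_progress_output := by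
  intro output _
  show PySem.Str.join "\n" (pvA ((PySem.Str.split? output "\n").getD []) "")
      = PySem.Str.join "\n" (pvB ((PySem.Str.split? output "\n").getD []))
  rw [(pvAB _).1]
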